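-- pv_equiv track=rewrite | github.com/slifty/dataomega | civomega/modules/census_population.py | age_range_for_age
-- ===== SOURCE A (Python) =====
-- SEX_AGE = { # table id B01001
--     'key_ages': [
--         0,
--         5,
--         10,
--         15,
--         18,
--         20,
--         21,
--         22,
--         25,
--         30,
--         35,
--         40,
--         45,
--         50,
--         55,
--         60,
--         62,
--         65,
--         67,
--         70,
--         75,
--         80,
--         85,
--         3200,
--         454656456
--     ],
--     'male': {
--         0: "b01001003", # means 0 to 4 years old
--         5: "b01001004",
--         10: "b01001005",
--         15: "b01001006",
--         18: "b01001007",
--         20: "b01001008",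
--         21: "b01001009",
--         22: "b01001010",
--         25: "b01001011",
--         30: "b01001012",
--         35: "b01001013",
--         40: "b01001014",
--         45: "b01001015",
--         50: "b01001016",
--         55: "b01001017",
--         60: "b01001018",
--         62: "b01001019",
--         65: "b01001020",
--         67: "b01001021",
--         70: "b01001022",
--         75: "b01001023",
--         80: "b01001024",
--         85: "b01001049"
--     },
--     'female': {
--         0: "b01001027",
--         5: "b01001028",
--         10: "b01001029",
--         15: "b01001030",
--         18: "b01001031",
--         20: "b01001032",
--         21: "b01001033",
--         22: "b01001034",
--         25: "b01001035",
--         30: "b01001036",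
--         35: "b01001037",
--         40: "b01001038",
--         45: "b01001039",
--         50: "b01001040",
--         55: "b01001041",
--         60: "b01001042",
--         62: "b01001043",
--         65: "b01001044",
--         67: "b01001045",
--         70: "b01001046",
--         75: "b01001047",
--         80: "b01001048",
--         85: "b01001049"
--     }
-- }
--
-- def age_range_for_age(age):
--     min_age = 0
--     max_age = 0
--     last_age = -1
--     for next_age in SEX_AGE['key_ages']:
--         if next_age > age:
--             min_age = last_age
--             max_age = next_age
--             break
--         last_age = next_age
--
--     return (min_age, max_age)
-- ===== SOURCE B (Python) =====
-- import bisect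
--
-- KEY_AGES = [0, 5, 10, 15, 18, 20, 21, 22, 25, 30, 35, 40, 45, 50, 55,
--             60, 62, 65, 67, 70, 75, 80, 85, 3200, 454656456]
--
-- def age_range_for_age(age):
--     idx = bisect.bisect_right(KEY_AGES, age)
--     if idx == len(KEY_AGES):
--         return (0, 0)
--     return (KEY_AGES[idx - 1] if idx > 0 else -1, KEY_AGES[idx])
-- ===== Notes on version B (the rewrite author's own statement) =====
-- stated objective: idiomatic
-- what changed: Replaced A's linear scan with break over the key table by a bisect.bisect_right binary search plus index arithmetic on the same sorted table.
import Mathlib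
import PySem

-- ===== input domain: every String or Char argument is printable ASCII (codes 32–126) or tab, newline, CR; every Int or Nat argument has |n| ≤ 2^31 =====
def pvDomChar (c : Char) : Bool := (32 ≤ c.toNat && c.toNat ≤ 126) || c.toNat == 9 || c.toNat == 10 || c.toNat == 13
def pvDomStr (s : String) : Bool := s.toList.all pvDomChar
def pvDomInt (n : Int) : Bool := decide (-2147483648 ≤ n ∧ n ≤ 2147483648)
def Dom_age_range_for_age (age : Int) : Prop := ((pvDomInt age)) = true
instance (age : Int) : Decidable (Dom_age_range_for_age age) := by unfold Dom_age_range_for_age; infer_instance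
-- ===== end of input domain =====

-- B replaces A's linear scan with a binary search (bisect_right) over the same sorted key table; objective: idiomatic.

def pvKeyAges : List Int :=
  [0, 5, 10, 15, 18, 20, 21, 22, 25, 30, 35, 40, 45, 50, 55,
   60, 62, 65, 67, 70, 75, 80, 85, 3200, 454656456]

-- ===== PORT A =====
-- A's for-loop with break, carrying last_age; [] = loop fell through (min/max stay 0).
def pvScanA (age last : Int) : List Int → Int × Int
  | [] => (0, 0)
  | k :: ks => if k > age then (last, k) else pvScanA age k ks

def age_range_for_age (age : Int) : Int × Int :=
  pvScanA age (-1) pvKeyAges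

-- ===== PORT B =====
-- bisect.bisect_right on the sorted key table, ported as the corresponding Lean
-- function on this sorted list: the number of leading elements ≤ age.
def pvBisectRight (a : List Int) (x : Int) : Nat :=
  (a.takeWhile (fun k => k ≤ x)).length

def age_range_for_age_alt (age : Int) : Int × Int :=
  let idx := pvBisectRight pvKeyAges age
  if idx = pvKeyAges.length then (0, 0)
  else ((if idx > 0 then pvKeyAges.getD (idx - 1) 0 else -1), pvKeyAges.getD idx 0)

-- ===== PRECONDITION & SPEC =====
def Spec_age_range_for_age (age : Int) (out : Int × Int) : Prop := out = age_range_for_age_alt age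
instance (age : Int) (out : Int × Int) : Decidable (Spec_age_range_for_age age out) := by unfold Spec_age_range_for_age; infer_instance

-- ===== CLAIM (what is proved, stated in full; the proofs are below) =====
def Claim_equal_age_range_for_age : Prop := ∀ (age : Int), Dom_age_range_for_age age → Spec_age_range_for_age age (age_range_for_age age)

-- ===== LEMMAS AND PROOFS =====

-- A's scan-with-break equals the bisect_right characterisation, for ANY key list.
theorem pvScanA_eq_bisect (age : Int) (ks : List Int) (last : Int) :
    pvScanA age last ks =
      (let idx := (ks.takeWhile (fun k => k ≤ age)).length;
       if idx = ks.length then (0, 0)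
       else ((if idx > 0 then ks.getD (idx - 1) 0 else last), ks.getD idx 0)) := by
  induction ks generalizing last with
  | nil => simp [pvScanA]
  | cons k ks ih =>
    by_cases h : k > age
    · have hk : ¬ (k ≤ age) := by omega
      simp [pvScanA, h, List.takeWhile, hk]
    · have hk : k ≤ age := by omega
      simp only [pvScanA, if_neg h, ih k, List.takeWhile, decide_eq_true hk]
      simp only [List.length_cons]
      by_cases he : (ks.takeWhile (fun k => k ≤ age)).length = ks.length
      · simp [he]
      · have hne : (ks.takeWhile (fun k => k ≤ age)).length + 1 ≠ ks.length + 1 := by omega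
        simp only [if_neg he, if_neg hne, Nat.add_sub_cancel,
          gt_iff_lt, Nat.succ_pos]
        rcases Nat.eq_zero_or_pos (ks.takeWhile (fun k => k ≤ age)).length with h0 | h0
        · simp [h0]
        · obtain ⟨m, hm⟩ : ∃ m, (ks.takeWhile (fun k => k ≤ age)).length = m + 1 :=
            ⟨_, (Nat.succ_pred_eq_of_pos h0).symm⟩
          simp [hm]

-- ===== VERDICT (by name: the statement is the Claim_ definition above) =====
theorem age_range_for_age_spec : Claim_equal_age_range_for_age := by
  intro age _
  unfold Spec_age_range_for_age age_range_for_age age_range_for_age_alt pvBisectRight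
  rw [pvScanA_eq_bisect]
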